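-- pv_equiv track=rewrite | github.com/Bega-jr/PalpiteiroBackend | app/services/estatisticas_service.py | calcular_metricas_jogo
-- ===== SOURCE A (Python) =====
-- PRIMOS = [2, 3, 5, 7, 11, 13, 17, 19, 23]
--
-- MOLDURA = [1, 2, 3, 4, 5, 6, 10, 11, 15, 16, 20, 21, 22, 23, 24, 25]
--
-- def calcular_metricas_jogo(jogo):
--     jogo = sorted(set(jogo))
--     pares = sum(1 for n in jogo if n % 2 == 0)
--     primos = sum(1 for n in jogo if n in PRIMOS)
--     moldura = sum(1 for n in jogo if n in MOLDURA)
--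
--     maior_seq = seq = 1
--     for i in range(1, len(jogo)):
--         if jogo[i] == jogo[i - 1] + 1:
--             seq += 1
--             maior_seq = max(maior_seq, seq)
--         else: seq = 1
--
--     return {
--         "soma": sum(jogo),
--         "pares": pares,
--         "impares": 15 - pares,
--         "primos": primos,
--         "moldura": moldura,
--         "centro": 15 - moldura,
--         "maior_sequencia": maior_seq
--     }
-- ===== SOURCE B (Python) =====
-- PRIMOS = [2, 3, 5, 7, 11, 13, 17, 19, 23]
--
-- MOLDURA = [1, 2, 3, 4, 5, 6, 10, 11, 15, 16, 20, 21, 22, 23, 24, 25]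
--
-- def calcular_metricas_jogo(jogo):
--     s = set(jogo)
--     soma = pares = primos = moldura = 0
--     for n in s:
--         soma += n
--         if n % 2 == 0: pares += 1
--         if n in PRIMOS: primos += 1
--         if n in MOLDURA: moldura += 1
--     best = 1
--     for n in s:
--         if n + 1 not in s:  # n ends a run of consecutive values: walk down to measure it
--             k = 1
--             while n - k in s:
--                 k += 1
--             best = max(best, k)
--     return {
--         "soma": soma,
--         "pares": pares,
--         "impares": 15 - pares,
--         "primos": primos,
--         "moldura": moldura,
--         "centro": 15 - moldura,
--         "maior_sequencia": best
--     }
-- ===== Notes on version B (the rewrite author's own statement) =====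
-- stated objective: alternative
-- what changed: Replaces sort-then-adjacent-scan with a hash-set longest-consecutive-run algorithm (walk down from each run end) and fuses the four sums/counts into one pass over the set, removing the sort entirely.
import Mathlib
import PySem

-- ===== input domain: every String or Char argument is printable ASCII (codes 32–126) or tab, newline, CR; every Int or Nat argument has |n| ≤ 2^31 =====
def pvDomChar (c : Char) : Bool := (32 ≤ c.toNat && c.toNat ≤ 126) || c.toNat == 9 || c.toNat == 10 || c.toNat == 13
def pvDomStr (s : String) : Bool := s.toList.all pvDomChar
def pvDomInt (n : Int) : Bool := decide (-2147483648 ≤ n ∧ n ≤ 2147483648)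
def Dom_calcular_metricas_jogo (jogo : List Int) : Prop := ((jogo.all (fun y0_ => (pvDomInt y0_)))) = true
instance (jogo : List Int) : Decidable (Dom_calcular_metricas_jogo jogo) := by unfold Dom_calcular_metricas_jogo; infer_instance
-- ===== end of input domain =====

-- B replaces A's sort-then-adjacent-scan with a hash-set longest-consecutive-run walk and one fused
-- counting pass over the set (no sort); an alternative algorithm of similar cost.

def pvPRIMOS : List Int := [2, 3, 5, 7, 11, 13, 17, 19, 23]
def pvMOLDURA : List Int := [1, 2, 3, 4, 5, 6, 10, 11, 15, 16, 20, 21, 22, 23, 24, 25]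

-- ===== PORT A =====
def calcular_metricas_jogo (jogo : List Int) : List (String × Int) :=
  let j := PySem.List.sorted (PySem.Set.ofList jogo) (fun x => x)
  let pares : Int := j.foldl (fun acc n => if PySem.Int.mod n 2 == 0 then acc + 1 else acc) 0
  let primos : Int := j.foldl (fun acc n => if pvPRIMOS.contains n then acc + 1 else acc) 0
  let moldura : Int := j.foldl (fun acc n => if pvMOLDURA.contains n then acc + 1 else acc) 0
  let ms := (PySem.List.pyRange 1 (PySem.List.len j) 1).foldl
      (fun (st : Int × Int) i =>
        if PySem.List.pyGetD j i 0 == PySem.List.pyGetD j (i - 1) 0 + 1 then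
          (max st.1 (st.2 + 1), st.2 + 1)
        else (st.1, 1)) (1, 1)
  [("soma", j.foldl (fun acc n => acc + n) 0), ("pares", pares), ("impares", 15 - pares),
   ("primos", primos), ("moldura", moldura), ("centro", 15 - moldura),
   ("maior_sequencia", ms.1)]

-- ===== PORT B =====
-- termination measure fact for the walk (cited by pvWalk's decreasing_by)
theorem pvFilterMono (p q : Int → Bool) (h : ∀ x, p x = true → q x = true) :
    ∀ (l : List Int), (l.filter p).length ≤ (l.filter q).length := by
  intro l
  induction l with
  | nil => simp
  | cons a t ih =>
    simp only [List.filter_cons]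
    by_cases hp : p a = true
    · rw [if_pos hp, if_pos (h a hp)]
      simpa using ih
    · rw [if_neg hp]
      split_ifs
      · simp
        omega
      · exact ih
theorem pvCountLe (s : List Int) (m : Int) (hm : m ∈ s) :
    (s.filter (fun x => decide (x ≤ m - 1))).length < (s.filter (fun x => decide (x ≤ m))).length := by
  induction s with
  | nil => cases hm
  | cons a t ih =>
    have hmono := pvFilterMono (fun x => decide (x ≤ m - 1)) (fun x => decide (x ≤ m))
      (fun x hx => decide_eq_true (by have := of_decide_eq_true hx; omega)) t
    rcases List.mem_cons.mp hm with rfl | hm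
    · simp only [List.filter_cons]
      split_ifs with h1 h2 <;> simp_all <;> omega
    · have := ih hm
      simp only [List.filter_cons]
      split_ifs with h1 h2 <;> simp_all <;> omega

-- the 'while n - k in s: k += 1' loop of B
def pvWalk (s : List Int) (n k : Int) : Int :=
  if s.contains (n - k) then pvWalk s n (k + 1) else k
termination_by (s.filter (fun x => decide (x ≤ n - k))).length
decreasing_by
  have hm : (n - k) ∈ s := by simp_all
  have h := pvCountLe s (n - k) hm
  simpa [show n - (k + 1) = n - k - 1 by ring] using h

def calcular_metricas_jogo_alt (jogo : List Int) : List (String × Int) :=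
  let s := PySem.Set.ofList jogo
  let acc := s.foldl
      (fun (t : Int × Int × Int × Int) n =>
        (t.1 + n,
         if PySem.Int.mod n 2 == 0 then t.2.1 + 1 else t.2.1,
         if pvPRIMOS.contains n then t.2.2.1 + 1 else t.2.2.1,
         if pvMOLDURA.contains n then t.2.2.2 + 1 else t.2.2.2)) (0, 0, 0, 0)
  let best := s.foldl (fun b n => if !PySem.Set.contains s (n + 1) then max b (pvWalk s n 1) else b) 1
  [("soma", acc.1), ("pares", acc.2.1), ("impares", 15 - acc.2.1),
   ("primos", acc.2.2.1), ("moldura", acc.2.2.2), ("centro", 15 - acc.2.2.2),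
   ("maior_sequencia", best)]

-- ===== PRECONDITION & SPEC =====
def Spec_calcular_metricas_jogo (jogo : List Int) (out : List (String × Int)) : Prop := out = calcular_metricas_jogo_alt jogo
instance (jogo : List Int) (out : List (String × Int)) : Decidable (Spec_calcular_metricas_jogo jogo out) := by unfold Spec_calcular_metricas_jogo; infer_instance

-- ===== CLAIM (what is proved, stated in full; the proofs are below) =====
def Claim_equal_calcular_metricas_jogo : Prop := ∀ (jogo : List Int), Dom_calcular_metricas_jogo jogo → Spec_calcular_metricas_jogo jogo (calcular_metricas_jogo jogo)

-- ===== LEMMAS AND PROOFS =====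

-- length of the descending consecutive run inside s that ends at n (proof-side characterisation)
def pvDown (s : List Int) (n : Int) : Int :=
  if h : (n - 1) ∈ s then pvDown s (n - 1) + 1 else 1
termination_by (s.filter (fun x => decide (x ≤ n - 1))).length
decreasing_by
  have := pvCountLe s (n - 1) h
  simpa using this

theorem pvWalk_eq (s : List Int) (n k : Int) : pvWalk s n k = (k - 1) + pvDown s (n - k + 1) := by
  fun_induction pvWalk s n k with
  | case1 k h ih =>
    have hm : (n - k) ∈ s := by simpa using h
    have hd : pvDown s (n - k + 1) = pvDown s (n - k) + 1 := by
      rw [pvDown, show n - k + 1 - 1 = n - k by ring, dif_pos hm]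
    rw [ih, hd, show n - (k + 1) + 1 = n - k by ring]
    ring
  | case2 k h =>
    have hm : (n - k) ∉ s := by simpa using h
    have hd : pvDown s (n - k + 1) = 1 := by
      rw [pvDown, show n - k + 1 - 1 = n - k by ring, dif_neg hm]
    rw [hd]
    ring

-- fold of f over adjacent pairs, carrying the previous element
def pvPairFold (f : (Int × Int) → Int → Int → (Int × Int)) (st : Int × Int) (prev : Int) :
    List Int → (Int × Int)
  | [] => st
  | x :: xs => pvPairFold f (f st prev x) x xs

theorem pvFoldRangeNat (f : (Int × Int) → Int → Int → (Int × Int)) :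
    ∀ (t : List Int) (h : Int) (st : Int × Int),
      (List.range t.length).foldl
          (fun a k => f a ((h :: t).getD k 0) ((h :: t).getD (k + 1) 0)) st
        = pvPairFold f st h t := by
  intro t
  induction t with
  | nil => intro h st; rfl
  | cons x xs ih =>
    intro h st
    rw [List.length_cons, List.range_succ_eq_map, List.foldl_cons, List.foldl_map]
    simp only [List.getD_cons_zero, List.getD_cons_succ]
    exact ih x (f st h x)

theorem pvAloop (f : (Int × Int) → Int → Int → (Int × Int)) (h : Int) (t : List Int) (st : Int × Int) :
    (PySem.List.pyRange 1 (PySem.List.len (h :: t)) 1).foldl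
        (fun a i => f a (PySem.List.pyGetD (h :: t) (i - 1) 0) (PySem.List.pyGetD (h :: t) i 0)) st
      = pvPairFold f st h t := by
  have hlen : ((PySem.List.len (h :: t)) - 1).toNat = t.length := by
    simp
  rw [PySem.List.pyRange_one, hlen, List.foldl_map]
  have hfun : (fun (a : Int × Int) (k : Nat) =>
        f a (PySem.List.pyGetD (h :: t) (1 + (k : Int) - 1) 0) (PySem.List.pyGetD (h :: t) (1 + (k : Int)) 0))
      = fun a k => f a ((h :: t).getD k 0) ((h :: t).getD (k + 1) 0) := by
    funext a k
    rw [show (1 + (k : Int) - 1) = ((k : Nat) : Int) by ring, PySem.List.pyGetD_natCast]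
    rw [show (1 + (k : Int)) = (((k + 1 : Nat)) : Int) by push_cast; ring, PySem.List.pyGetD_natCast]
  rw [hfun]
  exact pvFoldRangeNat f t h st

-- the body of A's maior_sequencia loop, as a function of (prev, cur)
def pvF (st : Int × Int) (prev cur : Int) : Int × Int :=
  if cur == prev + 1 then (max st.1 (st.2 + 1), st.2 + 1) else (st.1, 1)

theorem pvMain (s : List Int) :
    ∀ (t : List Int) (prev maior seq : Int),
      prev ∈ s → (∀ y ∈ t, y ∈ s) → (prev :: t).Pairwise (· < ·) →
      (∀ y ∈ s, y ∉ t → y ≤ prev) → seq = pvDown s prev → 1 ≤ maior →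
      (pvPairFold pvF (maior, seq) prev t).1
        = t.foldl (fun b n => max b (pvDown s n)) maior := by
  intro t
  induction t with
  | nil => intro prev maior seq _ _ _ _ _ _; rfl
  | cons x xs ih =>
    intro prev maior seq hprev ht hpw hcl hseq hm1
    have hpx : prev < x := (List.pairwise_cons.mp hpw).1 x (List.mem_cons_self)
    have hxs : x ∈ s := ht x (List.mem_cons_self)
    have htxs : ∀ y ∈ xs, y ∈ s := fun y hy => ht y (List.mem_cons_of_mem _ hy)
    have hpw' : (x :: xs).Pairwise (· < ·) := hpw.of_cons
    have hxgt : ∀ y ∈ xs, x < y := (List.pairwise_cons.mp hpw').1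
    have hcl' : ∀ y ∈ s, y ∉ xs → y ≤ x := by
      intro y hy hyn
      by_cases hyx : y = x
      · omega
      · have : y ∉ (x :: xs) := by simp [hyx, hyn]
        have := hcl y hy this
        omega
    by_cases hc : x = prev + 1
    · have hdx : pvDown s x = seq + 1 := by
        rw [pvDown, dif_pos (by rw [show x - 1 = prev by omega]; exact hprev)]
        rw [show x - 1 = prev by omega, ← hseq]
      have hstep : pvPairFold pvF (maior, seq) prev (x :: xs)
          = pvPairFold pvF (max maior (seq + 1), seq + 1) x xs := by
        show pvPairFold pvF (pvF (maior, seq) prev x) x xs = _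
        rw [pvF, if_pos (by simp [hc])]
      rw [hstep, ih x (max maior (seq + 1)) (seq + 1) hxs htxs hpw' hcl' hdx.symm (by omega)]
      rw [List.foldl_cons, hdx]
    · have hx1 : (x - 1) ∉ s := by
        intro hmem
        have hne : x - 1 ≠ x := by omega
        have hni : x - 1 ∉ xs := fun hin => absurd (hxgt _ hin) (by omega)
        have : x - 1 ∉ (x :: xs) := by simp [hne, hni]
        have := hcl (x - 1) hmem this
        omega
      have hdx : pvDown s x = 1 := by rw [pvDown, dif_neg hx1]
      have hstep : pvPairFold pvF (maior, seq) prev (x :: xs)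
          = pvPairFold pvF (maior, 1) x xs := by
        show pvPairFold pvF (pvF (maior, seq) prev x) x xs = _
        rw [pvF, if_neg (by simp [hc])]
      rw [hstep, ih x maior 1 hxs htxs hpw' hcl' hdx.symm hm1]
      rw [List.foldl_cons, hdx, show max maior 1 = maior by omega]

theorem pvCountGe (s : List Int) (m : Int) (hm : m ∈ s) :
    (s.filter (fun x => decide (m < x))).length < (s.filter (fun x => decide (m - 1 < x))).length := by
  induction s with
  | nil => cases hm
  | cons a t ih =>
    have hmono := pvFilterMono (fun x => decide (m < x)) (fun x => decide (m - 1 < x))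
      (fun x hx => decide_eq_true (by have := of_decide_eq_true hx; omega)) t
    rcases List.mem_cons.mp hm with rfl | hm
    · simp only [List.filter_cons]
      split_ifs with h1 h2 <;> simp_all <;> omega
    · have := ih hm
      simp only [List.filter_cons]
      split_ifs with h1 h2 <;> simp_all <;> omega

theorem pvExistsEnd (s : List Int) (n : Int) (hn : n ∈ s) :
    ∃ e ∈ s, (e + 1) ∉ s ∧ pvDown s n ≤ pvDown s e := by
  have aux : ∀ (k : Nat) (n : Int), n ∈ s → (s.filter (fun x => decide (n < x))).length ≤ k →
      ∃ e ∈ s, (e + 1) ∉ s ∧ pvDown s n ≤ pvDown s e := by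
    intro k
    induction k with
    | zero =>
      intro n hn hk
      by_cases h : (n + 1) ∈ s
      · exfalso
        have : (n + 1) ∈ s.filter (fun x => decide (n < x)) :=
          List.mem_filter.mpr ⟨h, decide_eq_true (by omega)⟩
        have := List.length_pos_of_mem this
        omega
      · exact ⟨n, hn, h, le_refl _⟩
    | succ k ih =>
      intro n hn hk
      by_cases h : (n + 1) ∈ s
      · have hlt := pvCountGe s (n + 1) h
        rw [show n + 1 - 1 = n by ring] at hlt
        obtain ⟨e, he, hend, hle⟩ := ih (n + 1) h (by omega)
        have hstep : pvDown s (n + 1) = pvDown s n + 1 := by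
          rw [pvDown, dif_pos (by rw [show n + 1 - 1 = n by ring]; exact hn),
            show n + 1 - 1 = n by ring]
        exact ⟨e, he, hend, by omega⟩
      · exact ⟨n, hn, h, le_refl _⟩
  exact aux (s.filter (fun x => decide (n < x))).length n hn (le_refl _)

theorem pvCondFold_ge_init (s : List Int) :
    ∀ (l : List Int) (b : Int),
      b ≤ l.foldl (fun b n => if !PySem.Set.contains s (n + 1) then max b (pvDown s n) else b) b := by
  intro l
  induction l with
  | nil => intro b; exact le_refl _
  | cons a t ih =>
    intro b
    rw [List.foldl_cons]
    have hb : b ≤ if !s.contains (a + 1) then max b (pvDown s a) else b := by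
      split_ifs <;> omega
    exact le_trans hb (ih _)

theorem pvCondFold_ge_mem (s : List Int) :
    ∀ (l : List Int) (b e : Int), e ∈ l → (e + 1) ∉ s →
      pvDown s e ≤ l.foldl (fun b n => if !PySem.Set.contains s (n + 1) then max b (pvDown s n) else b) b := by
  intro l
  induction l with
  | nil => intro b e he _; cases he
  | cons a t ih =>
    intro b e he hend
    rw [List.foldl_cons]
    rcases List.mem_cons.mp he with rfl | he
    · have hcond : (!PySem.Set.contains s (e + 1)) = true := by
        simp [PySem.Set.contains, hend]
      rw [if_pos hcond]
      exact le_trans (le_max_right _ _) (pvCondFold_ge_init s t _)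
    · exact ih _ e he hend

theorem pvCondFold_le (s : List Int) :
    ∀ (l : List Int) (b1 b2 : Int), b1 ≤ b2 →
      l.foldl (fun b n => if !PySem.Set.contains s (n + 1) then max b (pvDown s n) else b) b1
        ≤ l.foldl (fun b n => max b (pvDown s n)) b2 := by
  intro l
  induction l with
  | nil => intro b1 b2 h; exact h
  | cons a t ih =>
    intro b1 b2 h
    rw [List.foldl_cons, List.foldl_cons]
    apply ih
    split_ifs <;> omega

theorem pvMaxFold_le (s : List Int) :
    ∀ (l : List Int) (b c : Int), b ≤ c → (∀ n ∈ l, pvDown s n ≤ c) →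
      l.foldl (fun b n => max b (pvDown s n)) b ≤ c := by
  intro l
  induction l with
  | nil => intro b c h _; exact h
  | cons a t ih =>
    intro b c h hall
    rw [List.foldl_cons]
    apply ih
    · have := hall a (List.mem_cons_self)
      omega
    · exact fun n hn => hall n (List.mem_cons_of_mem _ hn)

theorem pvMaxEq (s : List Int) :
    s.foldl (fun b n => max b (pvDown s n)) 1
      = s.foldl (fun b n => if !PySem.Set.contains s (n + 1) then max b (pvDown s n) else b) 1 := by
  apply le_antisymm
  · apply pvMaxFold_le s s 1 _ (pvCondFold_ge_init s s 1)
    intro n hn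
    obtain ⟨e, he, hend, hle⟩ := pvExistsEnd s n hn
    exact le_trans hle (pvCondFold_ge_mem s s 1 e he hend)
  · exact pvCondFold_le s s 1 1 (le_refl _)

theorem pvSplit :
    ∀ (l : List Int) (a b c d : Int),
      l.foldl (fun (t : Int × Int × Int × Int) n =>
          (t.1 + n,
           if PySem.Int.mod n 2 == 0 then t.2.1 + 1 else t.2.1,
           if pvPRIMOS.contains n then t.2.2.1 + 1 else t.2.2.1,
           if pvMOLDURA.contains n then t.2.2.2 + 1 else t.2.2.2)) (a, b, c, d)
        = (l.foldl (fun acc n => acc + n) a,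
           l.foldl (fun acc n => if PySem.Int.mod n 2 == 0 then acc + 1 else acc) b,
           l.foldl (fun acc n => if pvPRIMOS.contains n then acc + 1 else acc) c,
           l.foldl (fun acc n => if pvMOLDURA.contains n then acc + 1 else acc) d) := by
  intro l
  induction l with
  | nil => intro a b c d; rfl
  | cons x t ih =>
    intro a b c d
    rw [List.foldl_cons, List.foldl_cons, List.foldl_cons, List.foldl_cons, List.foldl_cons]
    exact ih _ _ _ _

theorem pvMaiorEq (jogo : List Int) :
    ((PySem.List.pyRange 1 (PySem.List.len (PySem.List.sorted (PySem.Set.ofList jogo) (fun x => x))) 1).foldl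
        (fun (st : Int × Int) i =>
          if PySem.List.pyGetD (PySem.List.sorted (PySem.Set.ofList jogo) (fun x => x)) i 0
              == PySem.List.pyGetD (PySem.List.sorted (PySem.Set.ofList jogo) (fun x => x)) (i - 1) 0 + 1 then
            (max st.1 (st.2 + 1), st.2 + 1)
          else (st.1, 1)) (1, 1)).1
      = (PySem.Set.ofList jogo).foldl
          (fun b n => if !(PySem.Set.ofList jogo).contains (n + 1) then max b (pvWalk (PySem.Set.ofList jogo) n 1) else b) 1 := by
  have hwalk : (fun (b n : Int) => if !(PySem.Set.ofList jogo).contains (n + 1) then max b (pvWalk (PySem.Set.ofList jogo) n 1) else b)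
      = fun b n => if !(PySem.Set.ofList jogo).contains (n + 1) then max b (pvDown (PySem.Set.ofList jogo) n) else b := by
    funext b n
    rw [pvWalk_eq, show n - 1 + 1 = n by ring, show (1 : Int) - 1 + pvDown (PySem.Set.ofList jogo) n = pvDown (PySem.Set.ofList jogo) n by ring]
  rw [hwalk, ← pvMaxEq]
  have hperm : (PySem.List.sorted (PySem.Set.ofList jogo) (fun x => x)).Perm (PySem.Set.ofList jogo) :=
    PySem.List.sorted_perm _ _ _
  have hpair : (PySem.List.sorted (PySem.Set.ofList jogo) (fun x => x)).Pairwise (· < ·) :=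
    PySem.List.sorted_ofList_pairwise_lt jogo
  have hfoldperm : (PySem.List.sorted (PySem.Set.ofList jogo) (fun x => x)).foldl
        (fun b n => max b (pvDown (PySem.Set.ofList jogo) n)) 1
      = (PySem.Set.ofList jogo).foldl (fun b n => max b (pvDown (PySem.Set.ofList jogo) n)) 1 :=
    @List.Perm.foldl_eq _ _ _ _ _ ⟨fun b a1 a2 => by omega⟩ hperm 1
  rw [← hfoldperm]
  cases hL : PySem.List.sorted (PySem.Set.ofList jogo) (fun x => x) with
  | nil =>
    simp
  | cons h t =>
    have hbody : (fun (st : Int × Int) (i : Int) =>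
          if PySem.List.pyGetD (h :: t) i 0 == PySem.List.pyGetD (h :: t) (i - 1) 0 + 1 then
            (max st.1 (st.2 + 1), st.2 + 1)
          else (st.1, 1))
        = fun a i => pvF a (PySem.List.pyGetD (h :: t) (i - 1) 0) (PySem.List.pyGetD (h :: t) i 0) := rfl
    rw [hbody, pvAloop]
    have hmem : ∀ y, y ∈ (h :: t) ↔ y ∈ PySem.Set.ofList jogo := by
      intro y
      rw [← hL]
      exact hperm.mem_iff
    have hhs : h ∈ PySem.Set.ofList jogo := (hmem h).mp (List.mem_cons_self)
    have hmin : ∀ y ∈ PySem.Set.ofList jogo, h ≤ y :=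
      PySem.List.key_head_sorted_le _ (fun x => x) hL
    have hdh : pvDown (PySem.Set.ofList jogo) h = 1 := by
      rw [pvDown, dif_neg]
      intro hc
      have := hmin _ hc
      omega
    rw [hL] at hpair
    have hmain := pvMain (PySem.Set.ofList jogo) t h 1 1 hhs
      (fun y hy => (hmem y).mp (List.mem_cons_of_mem _ hy)) hpair
      (by
        intro y hy hyn
        rcases List.mem_cons.mp ((hmem y).mpr hy) with rfl | hyt
        · exact le_refl _
        · exact absurd hyt hyn)
      hdh.symm (le_refl _)
    rw [hmain, List.foldl_cons, hdh, show max (1 : Int) 1 = 1 from max_self 1]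

-- ===== VERDICT (by name: the statement is the Claim_ definition above) =====
theorem calcular_metricas_jogo_spec : Claim_equal_calcular_metricas_jogo := by
  intro jogo _
  show calcular_metricas_jogo jogo = calcular_metricas_jogo_alt jogo
  unfold calcular_metricas_jogo calcular_metricas_jogo_alt
  have hperm : (PySem.List.sorted (PySem.Set.ofList jogo) (fun x => x)).Perm (PySem.Set.ofList jogo) :=
    PySem.List.sorted_perm _ _ _
  have hsoma := @List.Perm.foldl_eq _ _ (fun (acc : Int) (n : Int) => acc + n) _ _
    ⟨fun b a1 a2 => by ring⟩ hperm 0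
  have hpar := @List.Perm.foldl_eq _ _
    (fun (acc : Int) (n : Int) => if PySem.Int.mod n 2 == 0 then acc + 1 else acc) _ _
    ⟨fun b a1 a2 => by split_ifs <;> ring⟩ hperm 0
  have hpri := @List.Perm.foldl_eq _ _
    (fun (acc : Int) (n : Int) => if pvPRIMOS.contains n then acc + 1 else acc) _ _
    ⟨fun b a1 a2 => by split_ifs <;> ring⟩ hperm 0
  have hmol := @List.Perm.foldl_eq _ _
    (fun (acc : Int) (n : Int) => if pvMOLDURA.contains n then acc + 1 else acc) _ _
    ⟨fun b a1 a2 => by split_ifs <;> ring⟩ hperm 0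
  simp only [pvSplit]
  rw [hsoma, hpar, hpri, hmol, pvMaiorEq]
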